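-- pv_equiv track=rewrite | github.com/open-contracting-archive/use-case-demo | indicatorCalculation/indicator/indicator.py | score_award_period
-- ===== SOURCE A (Python) =====
-- def score_award_period(number_of_days):
--     '''Returns a score for the award period as defined in
--        the kd_ted_sample_20140725.do script
--     '''
--
--     bins = [(None, -1, 20), (-1, 23, 6), (23, 42, 5), (42, 43, 4),
--             (43, 48, 3), (48, 52, 2), (52, None, 1)]
--
--     for lower, upper, score in bins:
--
--         if lower:
--             above = lower < number_of_days
--         else:
--             above = True
--
--         if upper:
--             underneath = number_of_days <= upper
--         else:
--             underneath = True
--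
--         if above and underneath:
--             return score
-- ===== SOURCE B (Python) =====
-- def score_award_period(number_of_days):
--     '''Returns a score for the award period as defined in
--        the kd_ted_sample_20140725.do script
--     '''
--     idx = sum(t < number_of_days for t in (-1, 23, 42, 43, 48, 52))
--     return (20, 6, 5, 4, 3, 2, 1)[idx]
-- ===== Notes on version B (the rewrite author's own statement) =====
-- stated objective: simpler
-- what changed: Replaces the bin-table loop with truthiness guards by counting how many thresholds are below the input and indexing a score tuple once.
import Mathlib
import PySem

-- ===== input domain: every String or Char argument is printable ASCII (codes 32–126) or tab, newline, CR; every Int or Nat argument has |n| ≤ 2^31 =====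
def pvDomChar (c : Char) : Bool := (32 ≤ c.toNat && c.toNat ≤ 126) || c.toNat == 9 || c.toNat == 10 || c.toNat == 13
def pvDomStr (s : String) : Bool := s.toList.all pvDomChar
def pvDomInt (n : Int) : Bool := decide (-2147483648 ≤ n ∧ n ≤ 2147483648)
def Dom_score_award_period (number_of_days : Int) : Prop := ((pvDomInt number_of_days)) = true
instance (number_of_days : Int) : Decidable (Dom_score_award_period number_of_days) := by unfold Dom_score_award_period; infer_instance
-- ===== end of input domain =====

-- B replaces A's bin-table loop (with its truthiness guards) by counting thresholds below the input and indexing a score list once; objective: simpler.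

-- ===== PORT A =====
-- the literal bins table; None -> none
def pvBins_score_award_period : List (Option Int × Option Int × Int) :=
  [(none, some (-1), 20), (some (-1), some 23, 6), (some 23, some 42, 5),
   (some 42, some 43, 4), (some 43, some 48, 3), (some 48, some 52, 2),
   (some 52, none, 1)]

-- the for-loop: early return -> Option; 'if lower:' is Python truthiness (none and some 0 are falsy)
def pvLoop_score_award_period (number_of_days : Int) :
    List (Option Int × Option Int × Int) → Option Int
  | [] => none
  | (lower, upper, score) :: rest =>
    let above := match lower with
      | some l => if l ≠ 0 then decide (l < number_of_days) else true
      | none => true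
    let underneath := match upper with
      | some u => if u ≠ 0 then decide (number_of_days ≤ u) else true
      | none => true
    if above && underneath then some score
    else pvLoop_score_award_period number_of_days rest

def score_award_period (number_of_days : Int) : Int :=
  -- the loop always returns on an Int input (the bins cover ℤ), so the .getD 0 default is unreachable
  (pvLoop_score_award_period number_of_days pvBins_score_award_period).getD 0

-- ===== PORT B =====
def score_award_period_alt (number_of_days : Int) : Int :=
  let idx : Int := (([-1, 23, 42, 43, 48, 52] : List Int).countP (fun t => t < number_of_days) : Nat)
  -- idx is always in [0,6], so the .getD 0 default is unreachable
  (PySem.List.pyGet? ([20, 6, 5, 4, 3, 2, 1] : List Int) idx).getD 0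

-- ===== PRECONDITION & SPEC =====
def Spec_score_award_period (number_of_days : Int) (out : Int) : Prop := out = score_award_period_alt number_of_days
instance (number_of_days : Int) (out : Int) : Decidable (Spec_score_award_period number_of_days out) := by unfold Spec_score_award_period; infer_instance

-- ===== CLAIM (what is proved, stated in full; the proofs are below) =====
def Claim_equal_score_award_period : Prop := ∀ (number_of_days : Int), Dom_score_award_period number_of_days → Spec_score_award_period number_of_days (score_award_period number_of_days)

-- ===== LEMMAS AND PROOFS =====

-- ===== VERDICT (by name: the statement is the Claim_ definition above) =====
set_option maxHeartbeats 2000000 in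
theorem score_award_period_spec : Claim_equal_score_award_period := by
  intro n _
  unfold Spec_score_award_period
  by_cases h1 : n ≤ (-1 : Int)
  · simp [score_award_period, score_award_period_alt, pvLoop_score_award_period, pvBins_score_award_period, List.countP, List.countP.go, PySem.List.pyGet?, PySem.List.pyIdx?, show ¬(-1 : Int) < n from by omega, show n ≤ (-1 : Int) from by omega, show ¬(23 : Int) < n from by omega, show ¬(42 : Int) < n from by omega, show ¬(43 : Int) < n from by omega, show ¬(48 : Int) < n from by omega, show ¬(52 : Int) < n from by omega]
  by_cases h2 : n ≤ (23 : Int)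
  · simp [score_award_period, score_award_period_alt, pvLoop_score_award_period, pvBins_score_award_period, List.countP, List.countP.go, PySem.List.pyGet?, PySem.List.pyIdx?, show (-1 : Int) < n from by omega, show ¬n ≤ (-1 : Int) from by omega, show ¬(23 : Int) < n from by omega, show n ≤ (23 : Int) from by omega, show ¬(42 : Int) < n from by omega, show ¬(43 : Int) < n from by omega, show ¬(48 : Int) < n from by omega, show ¬(52 : Int) < n from by omega]
  by_cases h3 : n ≤ (42 : Int)
  · simp [score_award_period, score_award_period_alt, pvLoop_score_award_period, pvBins_score_award_period, List.countP, List.countP.go, PySem.List.pyGet?, PySem.List.pyIdx?, show (-1 : Int) < n from by omega, show ¬n ≤ (-1 : Int) from by omega, show (23 : Int) < n from by omega, show ¬n ≤ (23 : Int) from by omega, show ¬(42 : Int) < n from by omega, show n ≤ (42 : Int) from by omega, show ¬(43 : Int) < n from by omega, show ¬(48 : Int) < n from by omega, show ¬(52 : Int) < n from by omega]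
  by_cases h4 : n ≤ (43 : Int)
  · simp [score_award_period, score_award_period_alt, pvLoop_score_award_period, pvBins_score_award_period, List.countP, List.countP.go, PySem.List.pyGet?, PySem.List.pyIdx?, show (-1 : Int) < n from by omega, show ¬n ≤ (-1 : Int) from by omega, show (23 : Int) < n from by omega, show ¬n ≤ (23 : Int) from by omega, show (42 : Int) < n from by omega, show ¬n ≤ (42 : Int) from by omega, show ¬(43 : Int) < n from by omega, show n ≤ (43 : Int) from by omega, show ¬(48 : Int) < n from by omega, show ¬(52 : Int) < n from by omega]
  by_cases h5 : n ≤ (48 : Int)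
  · simp [score_award_period, score_award_period_alt, pvLoop_score_award_period, pvBins_score_award_period, List.countP, List.countP.go, PySem.List.pyGet?, PySem.List.pyIdx?, show (-1 : Int) < n from by omega, show ¬n ≤ (-1 : Int) from by omega, show (23 : Int) < n from by omega, show ¬n ≤ (23 : Int) from by omega, show (42 : Int) < n from by omega, show ¬n ≤ (42 : Int) from by omega, show (43 : Int) < n from by omega, show ¬n ≤ (43 : Int) from by omega, show ¬(48 : Int) < n from by omega, show n ≤ (48 : Int) from by omega, show ¬(52 : Int) < n from by omega]
  by_cases h6 : n ≤ (52 : Int)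
  · simp [score_award_period, score_award_period_alt, pvLoop_score_award_period, pvBins_score_award_period, List.countP, List.countP.go, PySem.List.pyGet?, PySem.List.pyIdx?, show (-1 : Int) < n from by omega, show ¬n ≤ (-1 : Int) from by omega, show (23 : Int) < n from by omega, show ¬n ≤ (23 : Int) from by omega, show (42 : Int) < n from by omega, show ¬n ≤ (42 : Int) from by omega, show (43 : Int) < n from by omega, show ¬n ≤ (43 : Int) from by omega, show (48 : Int) < n from by omega, show ¬n ≤ (48 : Int) from by omega, show ¬(52 : Int) < n from by omega, show n ≤ (52 : Int) from by omega]
  simp [score_award_period, score_award_period_alt, pvLoop_score_award_period, pvBins_score_award_period, List.countP, List.countP.go, PySem.List.pyGet?, PySem.List.pyIdx?, show (-1 : Int) < n from by omega, show ¬n ≤ (-1 : Int) from by omega, show (23 : Int) < n from by omega, show ¬n ≤ (23 : Int) from by omega, show (42 : Int) < n from by omega, show ¬n ≤ (42 : Int) from by omega, show (43 : Int) < n from by omega, show ¬n ≤ (43 : Int) from by omega, show (48 : Int) < n from by omega, show ¬n ≤ (48 : Int) from by omega, show (52 : Int) < n from by omega, show ¬n ≤ (52 : Int) from by omega]
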